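-- pv_equiv track=rewrite | github.com/sweetpeach/Inspired | code/interactive.py | nGramBlock
-- ===== SOURCE A (Python) =====
-- def nGramBlock(sent, n):
--     duplication = False
--     tokens = sent
--     ngram_list = []
--     for i in range(len(tokens)-n + 1):
--         ngram_list.append(tuple(tokens[i: i+n]))
--     ngram_set = set(ngram_list)
--     if len(ngram_set) != len(ngram_list):
--         duplication = True
--     return duplication
-- ===== SOURCE B (Python) =====
-- def nGramBlock(sent, n):
--     grams = sorted(tuple(sent[i:i + n]) for i in range(len(sent) - n + 1))
--     return any(a == b for a, b in zip(grams, grams[1:]))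
-- ===== Notes on version B (the rewrite author's own statement) =====
-- stated objective: alternative
-- what changed: Detects a repeated n-gram by sorting the list of windows and scanning adjacent pairs for an equal neighbour, instead of A's hash-based build-set-and-compare-lengths; no set or hashing is used.
import Mathlib
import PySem

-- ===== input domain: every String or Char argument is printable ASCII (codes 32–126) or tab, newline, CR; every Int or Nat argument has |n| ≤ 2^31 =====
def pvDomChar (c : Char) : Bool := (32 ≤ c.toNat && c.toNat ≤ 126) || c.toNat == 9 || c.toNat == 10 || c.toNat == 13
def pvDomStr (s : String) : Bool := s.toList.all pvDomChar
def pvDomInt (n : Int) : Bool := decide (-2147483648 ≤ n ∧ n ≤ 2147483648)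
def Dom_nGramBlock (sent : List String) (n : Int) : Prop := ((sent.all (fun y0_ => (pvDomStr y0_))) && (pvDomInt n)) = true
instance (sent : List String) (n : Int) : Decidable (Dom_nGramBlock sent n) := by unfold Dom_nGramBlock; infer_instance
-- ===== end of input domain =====

-- B detects a repeated n-gram by sorting the windows and scanning adjacent pairs for an equal neighbour (comparison-based, no set/hashing), instead of A's build-list/build-set/compare-lengths staging; alternative algorithm, similar cost.

-- ===== PORT A =====
def nGramBlock (sent : List String) (n : Int) : Bool :=
  let tokens := sent
  let ngramList :=
    (PySem.List.pyRange 0 ((sent.length : Int) - n + 1) 1).foldl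
      (fun acc i => acc ++ [PySem.List.slice tokens (some i) (some (i + n))]) []
  let ngramSet := PySem.Set.ofList ngramList
  if ngramSet.length ≠ ngramList.length then true else false

-- ===== PORT B =====
-- any(a == b for a, b in zip(grams, grams[1:]))
def nGramBlockAdj : List (List String) → Bool
  | a :: b :: t => a == b || nGramBlockAdj (b :: t)
  | _ => false

def nGramBlock_alt (sent : List String) (n : Int) : Bool :=
  let grams :=
    @PySem.List.sorted (List String) (List String) List.instLinearOrder.toLT LinearOrder.toDecidableLT
      ((PySem.List.pyRange 0 ((sent.length : Int) - n + 1) 1).map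
        (fun i => PySem.List.slice sent (some i) (some (i + n))))
      (fun g => g) false
  nGramBlockAdj grams

-- ===== PRECONDITION & SPEC =====
def Spec_nGramBlock (sent : List String) (n : Int) (out : Bool) : Prop := out = nGramBlock_alt sent n
instance (sent : List String) (n : Int) (out : Bool) : Decidable (Spec_nGramBlock sent n out) := by unfold Spec_nGramBlock; infer_instance

-- ===== CLAIM (what is proved, stated in full; the proofs are below) =====
def Claim_equal_nGramBlock : Prop := ∀ (sent : List String) (n : Int), Dom_nGramBlock sent n → Spec_nGramBlock sent n (nGramBlock sent n)

-- ===== LEMMAS AND PROOFS =====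

-- The adjacent-pair scan on a ≤-sorted list decides "has a duplicate".
theorem adj_eq_not_nodup (l : List (List String)) (hs : l.Pairwise (· ≤ ·)) :
    nGramBlockAdj l = decide (¬ l.Nodup) := by
  induction l with
  | nil => simp [nGramBlockAdj]
  | cons a t ih =>
    match t, hs with
    | [], _ => simp [nGramBlockAdj]
    | b :: t', hs =>
      have hpt : (b :: t').Pairwise (· ≤ ·) := hs.of_cons
      have hab : a ≤ b := (List.pairwise_cons.mp hs).1 b (by simp)
      have hrec := ih hpt
      simp only [nGramBlockAdj, hrec]
      by_cases heq : a = b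
      · subst heq
        simp [List.nodup_cons]
      · have hane : (a == b) = false := by simp [heq]
        rw [hane, Bool.false_or, decide_eq_decide]
        have hnotmem : a ∉ b :: t' := by
          intro hmem
          rcases List.mem_cons.mp hmem with h | h
          · exact heq h
          · have hba : b ≤ a := (List.pairwise_cons.mp hpt).1 a h
            exact heq (le_antisymm hab hba)
        constructor
        · intro hnd hcons
          exact hnd (List.nodup_cons.mp hcons).2
        · intro hncons hnd
          exact hncons (List.nodup_cons.mpr ⟨hnotmem, hnd⟩)

theorem length_set_add_le {α : Type} [BEq α] (s : PySem.Set α) (x : α) :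
    (PySem.Set.add s x).length ≤ s.length + 1 := by
  simp only [PySem.Set.add]
  split <;> simp

theorem length_foldl_add_le {α : Type} [BEq α] (l : List α) (s : PySem.Set α) :
    (l.foldl PySem.Set.add s).length ≤ s.length + l.length := by
  induction l generalizing s with
  | nil => simp
  | cons x rest ih =>
    simp only [List.foldl_cons, List.length_cons]
    have := length_set_add_le s x
    have := ih (PySem.Set.add s x)
    omega

theorem length_foldl_add_iff {α : Type} [BEq α] [LawfulBEq α] (l : List α) (s : PySem.Set α) :
    (l.foldl PySem.Set.add s).length = s.length + l.length ↔
      l.Nodup ∧ ∀ x ∈ l, x ∉ s := by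
  induction l generalizing s with
  | nil => simp
  | cons x rest ih =>
    simp only [List.foldl_cons, List.length_cons, List.nodup_cons]
    by_cases h : x ∈ s
    · rw [PySem.Set.add_of_mem h]
      have := length_foldl_add_le rest s
      constructor
      · intro hlen; omega
      · rintro ⟨_, hall⟩
        exact absurd h (hall x (by simp))
    · rw [PySem.Set.add_of_not_mem h]
      have hlen : s.length + (rest.length + 1) = (s ++ [x]).length + rest.length := by
        simp; omega
      rw [hlen, ih]
      constructor
      · rintro ⟨hnd, hall⟩
        refine ⟨⟨fun hx => hall x hx (by simp), hnd⟩, ?_⟩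
        intro y hy
        rcases List.mem_cons.mp hy with hy | hy
        · subst hy; exact h
        · intro hm; exact hall y hy (by simp [hm])
      · rintro ⟨⟨hx, hnd⟩, hall⟩
        refine ⟨hnd, ?_⟩
        intro y hy hm
        rcases List.mem_append.mp hm with hm | hm
        · exact hall y (List.mem_cons_of_mem _ hy) hm
        · simp only [List.mem_singleton] at hm; subst hm; exact hx hy

theorem ofList_length_iff (l : List (List String)) :
    (PySem.Set.ofList l).length = l.length ↔ l.Nodup := by
  rw [PySem.Set.ofList_eq_foldl]
  have := length_foldl_add_iff l (PySem.Set.empty (α := List String))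
  simp only [PySem.Set.empty, List.length_nil, Nat.zero_add] at this
  rw [this]
  simp

theorem foldl_append_singleton {α β : Type} (f : α → β) (l : List α) (init : List β) :
    l.foldl (fun acc i => acc ++ [f i]) init = init ++ l.map f := by
  induction l generalizing init with
  | nil => simp
  | cons x rest ih => simp [ih]

-- ===== VERDICT (by name: the statement is the Claim_ definition above) =====
theorem nGramBlock_spec : Claim_equal_nGramBlock := by
  intro sent n _
  unfold Spec_nGramBlock nGramBlock nGramBlock_alt
  simp only [foldl_append_singleton, List.nil_append]
  set L := (PySem.List.pyRange 0 ((sent.length : Int) - n + 1) 1).map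
      (fun i => PySem.List.slice sent (some i) (some (i + n))) with hL
  set S := @PySem.List.sorted (List String) (List String) List.instLinearOrder.toLT
      LinearOrder.toDecidableLT L (fun g => g) false with hS
  have hperm : S.Perm L := by
    rw [hS]
    exact @PySem.List.sorted_perm (List String) (List String) List.instLinearOrder.toLT
      LinearOrder.toDecidableLT L (fun g => g) false
  have hpair : S.Pairwise (· ≤ ·) := by
    rw [hS]
    exact PySem.List.sorted_pairwise L (fun g => g)
  rw [adj_eq_not_nodup S hpair]
  by_cases h : L.Nodup
  · simp [(ofList_length_iff L).mpr h, hperm.nodup_iff.mpr h]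
  · have hs : ¬ S.Nodup := fun hn => h (hperm.nodup_iff.mp hn)
    have hne : (PySem.Set.ofList L).length ≠ L.length := fun he => h ((ofList_length_iff L).mp he)
    simp [hne, hs]
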